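-- pv_equiv track=rewrite | github.com/jeremycheong/AtlasSeries | ModelExport/yolov5_export/models/export.py | ReplaceScales
-- ===== SOURCE A (Python) =====
-- def ReplaceScales(ori_list, scales_name):
--     n_list = []
--     for i, x in enumerate(ori_list):
--         if i < 2:
--             n_list.append(x)
--         if i == 2:
--             n_list.append(scales_name)
--     return n_list
-- ===== SOURCE B (Python) =====
-- def ReplaceScales(ori_list, scales_name):
--     result = list(ori_list[:2])
--     if len(ori_list) > 2:
--         result.append(scales_name)
--     return result
-- ===== Notes on version B (the rewrite author's own statement) =====
-- stated objective: faster
-- what changed: Replaces the enumerate loop with per-index checks by a direct slice of the first two elements plus one length guard appending scales_name, making the work independent of list length.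
import Mathlib
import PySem

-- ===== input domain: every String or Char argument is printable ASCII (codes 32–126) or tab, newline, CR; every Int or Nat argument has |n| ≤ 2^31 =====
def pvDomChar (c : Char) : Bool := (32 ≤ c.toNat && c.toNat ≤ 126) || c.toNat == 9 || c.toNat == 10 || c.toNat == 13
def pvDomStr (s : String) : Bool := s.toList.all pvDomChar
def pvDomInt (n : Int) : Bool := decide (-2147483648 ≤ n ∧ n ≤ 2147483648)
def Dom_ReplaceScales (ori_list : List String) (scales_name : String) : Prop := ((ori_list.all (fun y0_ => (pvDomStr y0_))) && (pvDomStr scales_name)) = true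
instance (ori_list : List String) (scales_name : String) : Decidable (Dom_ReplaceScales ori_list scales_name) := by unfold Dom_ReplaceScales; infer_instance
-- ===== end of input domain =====

-- ===== PORT A =====
-- B replaces A's enumerate loop with a slice of the first two elements plus one length guard (simpler).
def ReplaceScales (ori_list : List String) (scales_name : String) : List String :=
  (PySem.List.enumerate ori_list).foldl
    (fun n_list p =>
      let n1 := if p.1 < 2 then n_list ++ [p.2] else n_list
      if p.1 = 2 then n1 ++ [scales_name] else n1) []

-- ===== PORT B =====
def ReplaceScales_alt (ori_list : List String) (scales_name : String) : List String :=
  let result := PySem.List.slice ori_list none (some 2)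
  if 2 < ori_list.length then result ++ [scales_name] else result

-- ===== PRECONDITION & SPEC =====
def Spec_ReplaceScales (ori_list : List String) (scales_name : String) (out : List String) : Prop := out = ReplaceScales_alt ori_list scales_name
instance (ori_list : List String) (scales_name : String) (out : List String) : Decidable (Spec_ReplaceScales ori_list scales_name out) := by unfold Spec_ReplaceScales; infer_instance

-- ===== CLAIM (what is proved, stated in full; the proofs are below) =====
def Claim_equal_ReplaceScales : Prop := ∀ (ori_list : List String) (scales_name : String), Dom_ReplaceScales ori_list scales_name → Spec_ReplaceScales ori_list scales_name (ReplaceScales ori_list scales_name)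

-- ===== LEMMAS AND PROOFS =====

-- ===== VERDICT (by name: the statement is the Claim_ definition above) =====
-- From index 3 on, the loop body is the identity.
theorem RS_fold_id (l : List String) (sn : String) (s : Int) (hs : 3 ≤ s) (acc : List String) :
    (PySem.List.enumerate l s).foldl
      (fun n_list p =>
        let n1 := if p.1 < 2 then n_list ++ [p.2] else n_list
        if p.1 = 2 then n1 ++ [sn] else n1) acc = acc := by
  induction l generalizing s with
  | nil => simp [PySem.List.enumerate_nil]
  | cons x xs ih =>
      rw [PySem.List.enumerate_cons, List.foldl_cons]
      have h1 : ¬ (s < 2) := by omega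
      have h2 : ¬ (s = 2) := by omega
      simp only [h1, h2, if_false]
      exact ih (s+1) (by omega)

theorem ReplaceScales_spec : Claim_equal_ReplaceScales := by
  intro ori_list scales_name _
  unfold Spec_ReplaceScales ReplaceScales ReplaceScales_alt
  match ori_list with
  | [] => simp [PySem.List.enumerate_nil, PySem.List.slice]
  | [a] => simp [PySem.List.enumerate_cons, PySem.List.enumerate_nil, PySem.List.slice]
  | [a, b] => simp [PySem.List.enumerate_cons, PySem.List.enumerate_nil, PySem.List.slice]
  | a :: b :: c :: rest =>
      simp only [PySem.List.enumerate_cons, List.foldl_cons]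
      rw [show (0:Int)+1+1+1 = 3 by norm_num, RS_fold_id rest scales_name 3 (by omega)]
      norm_num [PySem.List.slice]
      simp [List.take, show min (Int.toNat 2) (rest.length + 1 + 1 + 1) = 2 by omega]
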